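-- pv_equiv track=rewrite | github.com/Piolli/HammingCode | Main.py | get_postions_of_control_bits
-- ===== SOURCE A (Python) =====
-- def get_postions_of_control_bits(n):
--     # This is positions of control bits
--     two_in_pow = []
--
--
--     number_pow = 0
--     calc_number = 2 ** number_pow
--
--     while calc_number < n:
--         two_in_pow.append(2**number_pow)
--         number_pow += 1
--         calc_number = 2 ** number_pow
--
--     return two_in_pow
-- ===== SOURCE B (Python) =====
-- def get_postions_of_control_bits(n):
--     # closed-form count: k = number of i with 2**i < n
--     k = (n - 1).bit_length() if n > 1 else 0
--     return [1 << i for i in range(k)]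
-- ===== Notes on version B (the rewrite author's own statement) =====
-- stated objective: simpler
-- what changed: Replaces the condition-driven while loop (recomputing 2**p each round) by a closed-form count k=(n-1).bit_length() and one direct shift-built list.
import Mathlib
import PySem

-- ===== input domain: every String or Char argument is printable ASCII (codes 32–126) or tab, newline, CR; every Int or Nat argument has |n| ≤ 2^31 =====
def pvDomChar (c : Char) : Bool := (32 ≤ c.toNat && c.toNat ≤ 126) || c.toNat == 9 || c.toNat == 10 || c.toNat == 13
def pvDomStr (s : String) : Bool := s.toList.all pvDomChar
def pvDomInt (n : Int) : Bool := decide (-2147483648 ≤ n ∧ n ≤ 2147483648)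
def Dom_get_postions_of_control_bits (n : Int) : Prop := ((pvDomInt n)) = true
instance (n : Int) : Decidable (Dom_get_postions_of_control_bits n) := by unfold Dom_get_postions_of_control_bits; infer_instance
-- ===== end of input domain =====

-- B replaces A's condition-driven while loop by a closed-form count (bit_length) plus one direct pass (simpler).


-- ===== PORT A =====
-- the while loop of A: state is number_pow; appends 2**number_pow while 2**number_pow < n
def pvLoopA (n : Int) (p : Nat) : List Int :=
  if (2 : Int) ^ p < n then (2 : Int) ^ p :: pvLoopA n (p + 1) else []
termination_by (n - (2 : Int) ^ p).toNat
decreasing_by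
  have h1 : (1 : Int) ≤ (2 : Int) ^ p := one_le_pow₀ (by norm_num)
  have h2 : (2 : Int) ^ (p + 1) = 2 * (2 : Int) ^ p := by ring
  simp only [h2]
  omega

def get_postions_of_control_bits (n : Int) : List Int := pvLoopA n 0

-- ===== PORT B =====
-- k = (n-1).bit_length() if n > 1 else 0; Nat.size is Python's bit_length on nonnegative ints
def get_postions_of_control_bits_alt (n : Int) : List Int :=
  let k : Nat := if 1 < n then Nat.size (n - 1).toNat else 0
  (List.range k).map (fun i : Nat => (1 : Int) <<< (i : Int))

-- ===== PRECONDITION & SPEC =====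
def Spec_get_postions_of_control_bits (n : Int) (out : List Int) : Prop := out = get_postions_of_control_bits_alt n
instance (n : Int) (out : List Int) : Decidable (Spec_get_postions_of_control_bits n out) := by unfold Spec_get_postions_of_control_bits; infer_instance

-- ===== CLAIM (what is proved, stated in full; the proofs are below) =====
def Claim_equal_get_postions_of_control_bits : Prop := ∀ (n : Int), Dom_get_postions_of_control_bits n → Spec_get_postions_of_control_bits n (get_postions_of_control_bits n)

-- ===== LEMMAS AND PROOFS =====

-- B's count k characterises the loop's condition: 2^i < n ↔ i < k
theorem pv_k_char (n : Int) (i : Nat) :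
    ((2 : Int) ^ i < n) ↔ (i < (if 1 < n then Nat.size (n - 1).toNat else 0)) := by
  have h1 : (1 : Int) ≤ (2 : Int) ^ i := one_le_pow₀ (by norm_num)
  split_ifs with h
  · have hm : ((n - 1).toNat : Int) = n - 1 := Int.toNat_of_nonneg (by omega)
    have hsz : (i < Nat.size (n - 1).toNat) ↔ (2 ^ i ≤ (n - 1).toNat) := by
      rw [← not_le, Nat.size_le, not_lt]
    rw [hsz]
    have hcast : ((2 ^ i : Nat) : Int) = (2 : Int) ^ i := by push_cast; ring
    omega
  · simp only [Nat.not_lt_zero, iff_false, not_lt]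
    omega

theorem pv_loopA_eq (n : Int) (j p : Nat)
    (hk : (if 1 < n then Nat.size (n - 1).toNat else 0) = p + j) :
    pvLoopA n p = (List.range j).map (fun i => (2 : Int) ^ (p + i)) := by
  induction j generalizing p with
  | zero =>
    rw [pvLoopA]
    have hc : ¬ (2 : Int) ^ p < n := by rw [pv_k_char n p, hk]; omega
    simp [hc]
  | succ j ih =>
    rw [pvLoopA]
    have hcond : (2 : Int) ^ p < n := (pv_k_char n p).mpr (by omega)
    rw [if_pos hcond, ih (p + 1) (by omega)]
    rw [List.range_succ_eq_map, List.map_cons, List.map_map]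
    simp [Function.comp_def, Nat.add_assoc, Nat.add_comm 1]

-- ===== VERDICT (by name: the statement is the Claim_ definition above) =====
theorem get_postions_of_control_bits_spec : Claim_equal_get_postions_of_control_bits := by
  intro n _
  unfold Spec_get_postions_of_control_bits get_postions_of_control_bits get_postions_of_control_bits_alt
  rw [pv_loopA_eq n (if 1 < n then Nat.size (n - 1).toNat else 0) 0 (by omega)]
  dsimp only
  refine List.map_congr_left fun i _ => ?_
  rw [Int.one_shiftLeft]
  push_cast
  ring
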